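-- pv_equiv track=rewrite | github.com/jasonisme6/ai-code-review | opencv/detect_code_content.py | remove_hint_from_code_line
-- ===== SOURCE A (Python) =====
-- def remove_hint_from_code_line(line, hint_num):
--     result_line = ''
--     if line.count(":") == hint_num:
--         replace_flag = False
--         for index in range(len(line)):
--             if line[len(line) - 1 - index] == ':':
--                 replace_flag = True
--                 continue
--             if (line[len(line) - 1 - index] == '(' or line[len(line) - 1 - index] == ',') and replace_flag is True:
--                 result_line = line[len(line) - 1 - index] + result_line
--                 replace_flag = False
--                 continue
--             if replace_flag is False or line[len(line) - 1 - index] == ' ':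
--                 result_line = line[len(line) - 1 - index] + result_line
--                 continue
--             if replace_flag is True:
--                 continue
--     return result_line
-- ===== SOURCE B (Python) =====
-- def remove_hint_from_code_line(line, hint_num):
--     if line.count(":") != hint_num:
--         return ''
--
--     def proc(seg):
--         i = seg.rfind(':')
--         if i == -1:
--             return seg
--         return ''.join(ch for ch in seg[:i] if ch == ' ') + seg[i + 1:]
--
--     out = []
--     start = 0
--     for j, ch in enumerate(line):
--         if ch == '(' or ch == ',':
--             out.append(proc(line[start:j]))
--             out.append(ch)
--             start = j + 1
--     out.append(proc(line[start:]))
--     return ''.join(out)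
-- ===== Notes on version B (the rewrite author's own statement) =====
-- stated objective: alternative
-- what changed: Replaces A's right-to-left per-character flag automaton over character indices by a forward split of the line at '(' and ',' delimiters, processing each segment at once via rfind(':') (keep the part after the last colon, keep only spaces before it).
import Mathlib
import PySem

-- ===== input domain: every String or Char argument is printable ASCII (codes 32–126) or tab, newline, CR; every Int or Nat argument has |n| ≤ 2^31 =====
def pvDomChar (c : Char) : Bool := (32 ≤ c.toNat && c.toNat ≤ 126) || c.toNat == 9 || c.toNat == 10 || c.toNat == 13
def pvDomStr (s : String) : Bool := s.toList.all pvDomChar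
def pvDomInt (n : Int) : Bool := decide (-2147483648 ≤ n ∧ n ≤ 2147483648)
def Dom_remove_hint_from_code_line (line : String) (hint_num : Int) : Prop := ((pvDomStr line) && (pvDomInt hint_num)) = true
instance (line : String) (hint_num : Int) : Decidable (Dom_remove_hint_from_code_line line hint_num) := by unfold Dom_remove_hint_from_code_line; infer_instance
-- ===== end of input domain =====

-- B replaces A's right-to-left per-character flag automaton by a forward split at '(' / ','
-- with per-segment processing via the last colon (alternative decomposition, same cost).

-- ===== PORT A =====
-- loop body of A's for-loop: state = (result_line as List Char, replace_flag)
def pvAstep (st : List Char × Bool) (c : Char) : List Char × Bool :=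
  if c = ':' then (st.1, true)
  else if (c = '(' ∨ c = ',') ∧ st.2 = true then (c :: st.1, false)
  else if st.2 = false ∨ c = ' ' then (c :: st.1, st.2)
  else st

def remove_hint_from_code_line (line : String) (hint_num : Int) : String :=
  if (PySem.Str.count line ":" : Int) = hint_num then
    String.mk ((List.range line.toList.length).foldl
      (fun st index => pvAstep st (line.toList.getD (line.toList.length - 1 - index) ' '))
      ([], false)).1
  else ""

-- ===== PORT B =====
-- seg.rfind(':') ported as the split around the LAST colon: some (before, after), none if no colon
def pvLastColonSplit : List Char → Option (List Char × List Char)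
  | [] => none
  | c :: rest =>
    match pvLastColonSplit rest with
    | some (b, a) => some (c :: b, a)
    | none => if c = ':' then some ([], rest) else none

def pvProcSeg (seg : List Char) : List Char :=
  match pvLastColonSplit seg with
  | none => seg
  | some (b, a) => b.filter (fun c => c = ' ') ++ a

def pvIsDelim (c : Char) : Bool := c = '(' || c = ','

-- forward pass: seg accumulates the current segment's chars in reverse
def pvGo : List Char → List Char → List Char
  | [], seg => pvProcSeg seg.reverse
  | c :: rest, seg =>
    if pvIsDelim c then pvProcSeg seg.reverse ++ c :: pvGo rest []
    else pvGo rest (c :: seg)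

def remove_hint_from_code_line_alt (line : String) (hint_num : Int) : String :=
  if (PySem.Str.count line ":" : Int) = hint_num then String.mk (pvGo line.toList []) else ""

-- ===== PRECONDITION & SPEC =====
def Spec_remove_hint_from_code_line (line : String) (hint_num : Int) (out : String) : Prop := out = remove_hint_from_code_line_alt line hint_num
instance (line : String) (hint_num : Int) (out : String) : Decidable (Spec_remove_hint_from_code_line line hint_num out) := by unfold Spec_remove_hint_from_code_line; infer_instance

-- ===== CLAIM (what is proved, stated in full; the proofs are below) =====
def Claim_equal_remove_hint_from_code_line : Prop := ∀ (line : String) (hint_num : Int), Dom_remove_hint_from_code_line line hint_num → Spec_remove_hint_from_code_line line hint_num (remove_hint_from_code_line line hint_num)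

-- ===== LEMMAS AND PROOFS =====

-- does the list contain a colon?
def pvHasCol : List Char → Bool
  | [] => false
  | c :: t => if c = ':' then true else pvHasCol t

lemma pvLcs_none_iff (s : List Char) : pvLastColonSplit s = none ↔ pvHasCol s = false := by
  induction s with
  | nil => simp [pvLastColonSplit, pvHasCol]
  | cons c t ih =>
    simp only [pvLastColonSplit, pvHasCol]
    cases h : pvLastColonSplit t with
    | some p =>
      obtain ⟨b, a⟩ := p
      have hcolt : pvHasCol t = true := by
        cases hh : pvHasCol t
        · rw [ih.mpr hh] at h; cases h
        · rfl
      simp [hcolt]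
    | none =>
      have hcolt := ih.mp h
      by_cases hc : c = ':' <;> simp [hc, hcolt]

-- A's automaton on one delimiter-free segment (processed right-to-left = foldr)
lemma pvSeg_foldr (s : List Char) (acc : List Char)
    (h : ∀ c ∈ s, pvIsDelim c = false) :
    s.foldr (fun c st => pvAstep st c) (acc, false) = (pvProcSeg s ++ acc, pvHasCol s) := by
  induction s with
  | nil => simp [pvProcSeg, pvLastColonSplit, pvHasCol]
  | cons c t ih =>
    have hc : pvIsDelim c = false := h c (by simp)
    have ht : ∀ x ∈ t, pvIsDelim x = false := fun x hx => h x (by simp [hx])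
    have hcp : ¬(c = '(' ∨ c = ',') := by
      simp [pvIsDelim] at hc; tauto
    simp only [List.foldr_cons, ih ht]
    by_cases hcol : c = ':'
    · subst hcol
      simp only [pvAstep, if_pos]
      have : pvProcSeg (':' :: t) = pvProcSeg t := by
        simp only [pvProcSeg, pvLastColonSplit]
        cases hl : pvLastColonSplit t with
        | some p => simp [List.filter]
        | none => simp
      simp [this, pvHasCol]
    · cases hct : pvHasCol t with
      | false =>
        have hl : pvLastColonSplit t = none := (pvLcs_none_iff t).mpr hct
        have hthis : pvProcSeg (c :: t) = c :: t := by
          simp [pvProcSeg, pvLastColonSplit, hl, hcol]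
        have hpt : pvProcSeg t = t := by simp [pvProcSeg, hl]
        simp [pvAstep, hcol, hcp, hct, hthis, hpt, pvHasCol]
      | true =>
        obtain ⟨⟨b, a⟩, hl⟩ : ∃ p, pvLastColonSplit t = some p := by
          cases hl : pvLastColonSplit t with
          | none => rw [(pvLcs_none_iff t).mp hl] at hct; exact absurd hct (by simp)
          | some p => exact ⟨p, rfl⟩
        have hps : pvProcSeg (c :: t) =
            (if c = ' ' then ' ' :: (b.filter (fun x => x = ' ') ++ a) else b.filter (fun x => x = ' ') ++ a) := by
          simp only [pvProcSeg, pvLastColonSplit, hl, List.filter]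
          by_cases hsp : c = ' ' <;> simp [hsp]
        have hpt : pvProcSeg t = b.filter (fun x => x = ' ') ++ a := by
          simp [pvProcSeg, hl]
        by_cases hsp : c = ' '
        · subst hsp
          simp [pvAstep, hps, hpt, pvHasCol, hct]
        · simp [pvAstep, hcol, hcp, hsp, hps, hpt, pvHasCol, hct]

-- B's forward segmented pass equals A's right-to-left automaton (as a foldr)
lemma pvGo_eq (l : List Char) : ∀ (seg : List Char), (∀ c ∈ seg, pvIsDelim c = false) →
    pvGo l seg = ((seg.reverse ++ l).foldr (fun c st => pvAstep st c) ([], false)).1 := by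
  induction l with
  | nil =>
    intro seg hseg
    have := pvSeg_foldr seg.reverse [] (by intro c hc; exact hseg c (List.mem_reverse.mp hc))
    simp [pvGo, this]
  | cons c rest ih =>
    intro seg hseg
    by_cases hd : pvIsDelim c = true
    · have hstep : ∀ st : List Char × Bool, pvAstep st c = (c :: st.1, false) := by
        intro st
        have : (c = '(' ∨ c = ',') := by simp [pvIsDelim] at hd; tauto
        have hnc : ¬ c = ':' := by rcases this with h | h <;> subst h <;> decide
        cases hf : st.2 <;> simp [pvAstep, hnc, this, hf]
      have hrev : ∀ x ∈ seg.reverse, pvIsDelim x = false :=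
        fun x hx => hseg x (List.mem_reverse.mp hx)
      simp only [pvGo, hd, if_pos]
      rw [List.foldr_append, List.foldr_cons, hstep, pvSeg_foldr seg.reverse _ hrev]
      simp [ih [] (by simp)]
    · simp only [pvGo, hd, if_neg, Bool.not_eq_true]
      rw [ih (c :: seg) (by
        intro x hx
        rcases List.mem_cons.mp hx with rfl | hx
        · simpa using hd
        · exact hseg x hx)]
      simp
  
-- A's index loop over range(len) reading l[len-1-i] is the foldl over l.reverse
lemma pvRange_foldl (l : List Char) : ∀ (s : List Char × Bool),
    (List.range l.length).foldl (fun st index => pvAstep st (l.getD (l.length - 1 - index) ' ')) s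
      = l.reverse.foldl pvAstep s := by
  induction l using List.reverseRecOn with
  | nil => intro s; simp
  | append_singleton t c ih =>
    intro s
    have hlen : (t ++ [c]).length = t.length + 1 := by simp
    rw [hlen, List.range_succ_eq_map]
    simp only [List.foldl_cons, List.foldl_map]
    have h0 : (t ++ [c]).getD (t.length + 1 - 1 - 0) ' ' = c := by
      simp
    rw [h0]
    have hcong : (List.range t.length).foldl
        (fun st i => pvAstep st ((t ++ [c]).getD (t.length + 1 - 1 - (i + 1)) ' ')) (pvAstep s c)
      = (List.range t.length).foldl
        (fun st i => pvAstep st (t.getD (t.length - 1 - i) ' ')) (pvAstep s c) := by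
      apply PySem.List.foldl_congr_mem
      intro st i hi
      have hilt : i < t.length := List.mem_range.mp hi
      have : t.length + 1 - 1 - (i + 1) = t.length - 1 - i := by omega
      rw [this]
      have hj : t.length - 1 - i < t.length := by omega
      rw [List.getD_append _ _ _ _ hj]
    rw [hcong, ih]
    simp

-- ===== VERDICT (by name: the statement is the Claim_ definition above) =====
theorem remove_hint_from_code_line_spec : Claim_equal_remove_hint_from_code_line := by
  intro line hint_num _
  unfold Spec_remove_hint_from_code_line remove_hint_from_code_line remove_hint_from_code_line_alt
  split_ifs with h
  · rw [pvRange_foldl, List.foldl_reverse, pvGo_eq line.toList [] (by simp)]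
    simp
  · rfl
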